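-- pv_equiv track=rewrite | github.com/mjh09/python-code-practice | digit_degree.py | digitDegree
-- ===== SOURCE A (Python) =====
-- def digitDegree(n):
--     """
--     Returns the amount of steps it takes to reduce a numbers digits to
--     a single digit (e.g 901 -> 1: (9 + 0 + 1 = 10) -> 2: (1 + 0 = 1)
--
--     Parameters:
--         n (int): a number
--
--     Returns
--         cnt (int): the number of steps to reduction
--     """
--
--     dig_str = str(n)
--     digs = list(dig_str)
--     cnt = 0
--
--     while len(digs) > 1:
--         digs = sum([int(x) for x in digs])
--         digs = list(str(digs))
--         cnt += 1
--
--     return cnt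
-- ===== SOURCE B (Python) =====
-- def digitDegree(n):
--     s = str(n)
--     if len(s) <= 1:
--         return 0
--     return 1 + digitDegree(sum(int(c) for c in s))
-- ===== Notes on version B (the rewrite author's own statement) =====
-- stated objective: simpler
-- what changed: Replaces the while loop with list/counter state by a direct recursion on the recurrence digitDegree(n) = 0 if str(n) has one char else 1 + digitDegree(digit sum of str(n)), with no mutable state.
import Mathlib
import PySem

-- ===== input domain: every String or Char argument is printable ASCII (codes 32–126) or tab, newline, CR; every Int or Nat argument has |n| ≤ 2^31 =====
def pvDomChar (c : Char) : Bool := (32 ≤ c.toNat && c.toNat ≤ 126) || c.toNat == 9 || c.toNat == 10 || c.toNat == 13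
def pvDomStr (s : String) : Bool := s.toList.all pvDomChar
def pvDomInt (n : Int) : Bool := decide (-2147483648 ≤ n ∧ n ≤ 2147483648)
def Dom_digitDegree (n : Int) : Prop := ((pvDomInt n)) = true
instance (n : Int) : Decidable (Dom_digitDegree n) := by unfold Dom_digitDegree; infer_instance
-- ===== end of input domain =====

-- B replaces A's while loop and mutable list/counter state by a direct recursion on the
-- recurrence digitDegree(n) = 0 if str(n) is a single char, else 1 + digitDegree(digit sum).


-- int(x) for a single character x; exact for digit characters — on any other character
-- Python raises ValueError, which Pre_digitDegree excludes (negative n gives a '-' char).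
def pvDigit (c : Char) : Int := (PySem.Int.ofStr? (String.mk [c])).getD 0

-- ===== PORT A =====
-- A's while loop as a tail-recursive loop over the list of digit characters with a cnt
-- accumulator; fuel only makes the loop total (n.natAbs + 1 bounds the iteration count
-- on every input Pre_ admits, since each step strictly shrinks a value ≥ 10).
def digitDegreeLoop (fuel : Nat) (digs : List Char) (cnt : Int) : Int :=
  match fuel with
  | 0 => cnt
  | fuel + 1 =>
    if digs.length > 1 then
      let s := (digs.map pvDigit).foldl (· + ·) 0
      digitDegreeLoop fuel (PySem.Int.toStr s).toList (cnt + 1)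
    else cnt

def digitDegree (n : Int) : Int :=
  digitDegreeLoop (n.natAbs + 1) (PySem.Int.toStr n).toList 0

-- ===== PORT B =====
-- B's recursion: base case length ≤ 1 returns 0, else 1 + recursion on the digit sum.
def digitDegreeRec (fuel : Nat) (n : Int) : Int :=
  match fuel with
  | 0 => 0
  | fuel + 1 =>
    let s := (PySem.Int.toStr n).toList
    if s.length ≤ 1 then 0
    else 1 + digitDegreeRec fuel ((s.map pvDigit).foldl (· + ·) 0)

def digitDegree_alt (n : Int) : Int :=
  digitDegreeRec (n.natAbs + 1) n

-- ===== PRECONDITION & SPEC =====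
-- Pre_ excludes negative n, on which both Pythons raise ValueError (int('-')).
def Pre_digitDegree (n : Int) : Prop := 0 ≤ n
instance (n : Int) : Decidable (Pre_digitDegree n) := by unfold Pre_digitDegree; infer_instance
def pvWitness_digitDegree : Int := (901)

def Spec_digitDegree (n : Int) (out : Int) : Prop := out = digitDegree_alt n
instance (n : Int) (out : Int) : Decidable (Spec_digitDegree n out) := by unfold Spec_digitDegree; infer_instance

-- ===== CLAIM (what is proved, stated in full; the proofs are below) =====
def Claim_equal_digitDegree : Prop := ∀ (n : Int), Dom_digitDegree n → Pre_digitDegree n → Spec_digitDegree n (digitDegree n)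

-- ===== LEMMAS AND PROOFS =====
theorem loop_eq_rec (fuel : Nat) : ∀ (n cnt : Int),
    digitDegreeLoop fuel (PySem.Int.toStr n).toList cnt = cnt + digitDegreeRec fuel n := by
  induction fuel with
  | zero => intro n cnt; simp [digitDegreeLoop, digitDegreeRec]
  | succ f ih =>
    intro n cnt
    simp only [digitDegreeLoop, digitDegreeRec]
    by_cases h : ((PySem.Int.toStr n).toList).length > 1
    · rw [if_pos h, if_neg (by omega)]
      rw [ih]
      ring
    · rw [if_neg h, if_pos (by omega)]
      ring

-- ===== VERDICT (by name: the statement is the Claim_ definition above) =====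
theorem digitDegree_spec : Claim_equal_digitDegree := by
  intro n _ _
  show digitDegree n = digitDegree_alt n
  unfold digitDegree digitDegree_alt
  rw [loop_eq_rec]
  ring
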